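-- pv_equiv track=rewrite | github.com/rpych/simulatedAnnealingPrograms | sudoku_simulated_annealing.py | generate_non_fixed_rows_numbers
-- ===== SOURCE A (Python) =====
-- def generate_non_fixed_rows_numbers(A, n):
--     for i in range(n):
--         present = []
--         for j in range(n):
--             if A[i][j] > 0:
--                 present.append(A[i][j])
--
--         for j in range(n):
--             if A[i][j] > 0:
--                 continue
--             else:
--                 for num in range(1, 10):
--                     if num not in present:
--                         A[i][j] = num
--                         present.append(num)
--                         break
--
--     return A
-- ===== SOURCE B (Python) =====
-- def generate_non_fixed_rows_numbers(A, n):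
--     for i in range(n):
--         row = A[i]
--         missing = [d for d in range(1, 10) if d not in row[:n]]
--         for j in range(n):
--             if row[j] <= 0:
--                 if not missing:
--                     break
--                 row[j] = missing.pop(0)
--     return A
-- ===== Notes on version B (the rewrite author's own statement) =====
-- stated objective: simpler
-- what changed: Per row, the missing digits 1..9 are computed once as an ordered queue consumed across the empty cells, replacing A's inner scan of 1..9 against a growing 'present' list for every empty cell.
import Mathlib
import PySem

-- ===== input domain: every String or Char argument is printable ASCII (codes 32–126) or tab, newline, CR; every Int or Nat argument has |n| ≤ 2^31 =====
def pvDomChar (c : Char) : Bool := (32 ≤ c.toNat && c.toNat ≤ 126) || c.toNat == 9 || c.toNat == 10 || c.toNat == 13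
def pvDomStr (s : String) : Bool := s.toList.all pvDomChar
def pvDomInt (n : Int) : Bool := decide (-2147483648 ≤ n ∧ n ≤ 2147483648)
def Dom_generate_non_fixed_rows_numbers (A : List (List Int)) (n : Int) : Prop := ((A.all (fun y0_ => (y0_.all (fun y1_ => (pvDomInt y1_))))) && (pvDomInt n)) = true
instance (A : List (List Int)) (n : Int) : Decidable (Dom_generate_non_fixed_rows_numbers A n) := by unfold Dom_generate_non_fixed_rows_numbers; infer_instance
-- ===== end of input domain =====

-- B precomputes each row's missing digits 1..9 once and consumes them as a queue over the empty
-- cells, instead of A's rescan of 1..9 per empty cell (objective: simpler). Both Pythons mutate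
-- the argument A in place identically; the equivalence proved here is about the return value.

-- ===== PORT A =====
-- loop body of A's first inner loop: 'if A[i][j] > 0: present.append(A[i][j])'
def pvStepPresent (r : List Int) (p : List Int) (j : Int) : List Int :=
  if PySem.List.pyGetD r j 0 > 0 then p ++ [PySem.List.pyGetD r j 0] else p

-- A's innermost loop 'for num in range(1,10): if num not in present: … break' — first num not in present
def pvFindNum (nums : List Int) (present : List Int) : Option Int :=
  match nums with
  | [] => none
  | num :: rest => if present.contains num then pvFindNum rest present else some num

-- loop body of A's second inner loop, state = (current row, present)
def pvStepFill (st : List Int × List Int) (j : Int) : List Int × List Int :=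
  if PySem.List.pyGetD st.1 j 0 > 0 then st
  else
    match pvFindNum (PySem.List.pyRange 1 10 1) st.2 with
    | some num => (PySem.List.pySetD st.1 j num, st.2 ++ [num])
    | none => st

def generate_non_fixed_rows_numbers (A : List (List Int)) (n : Int) : List (List Int) :=
  (PySem.List.pyRange 0 n 1).foldl (fun M i =>
    let r := PySem.List.pyGetD M i []
    let present := (PySem.List.pyRange 0 n 1).foldl (pvStepPresent r) []
    let st := (PySem.List.pyRange 0 n 1).foldl pvStepFill (r, present)
    PySem.List.pySetD M i st.1) A

-- ===== PORT B =====
-- '[d for d in range(1, 10) if d not in row[:n]]'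
def pvMissingB (r : List Int) (n : Int) : List Int :=
  (PySem.List.pyRange 1 10 1).filter (fun d => !((PySem.List.slice r none (some n)).contains d))

-- B's 'for j in range(n): if row[j] <= 0: (break if queue empty, else assign its popped head)'
def pvFillRow (r : List Int) (j : Int) (n : Int) (missing : List Int) : List Int :=
  if _h : j < n then
    if PySem.List.pyGetD r j 0 ≤ 0 then
      match missing with
      | [] => r
      | m :: ms => pvFillRow (PySem.List.pySetD r j m) (j + 1) n ms
    else pvFillRow r (j + 1) n missing
  else r
termination_by (n - j).toNat
decreasing_by all_goals omega

def generate_non_fixed_rows_numbers_alt (A : List (List Int)) (n : Int) : List (List Int) :=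
  (PySem.List.pyRange 0 n 1).foldl (fun M i =>
    let row := PySem.List.pyGetD M i []
    PySem.List.pySetD M i (pvFillRow row 0 n (pvMissingB row n))) A

-- ===== PRECONDITION & SPEC =====
-- Pre_: exactly where Python A returns (no IndexError): the first n rows exist and each has at least n cells.
def Pre_generate_non_fixed_rows_numbers (A : List (List Int)) (n : Int) : Prop :=
  n ≤ (A.length : Int) ∧ ∀ row ∈ A.take n.toNat, n ≤ (row.length : Int)
instance (A : List (List Int)) (n : Int) : Decidable (Pre_generate_non_fixed_rows_numbers A n) := by
  unfold Pre_generate_non_fixed_rows_numbers; infer_instance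

def pvWitness_generate_non_fixed_rows_numbers : List (List Int) × Int :=
  ([[2, 0, 0], [0, 5, 0], [0, 0, 0]], 3)

def Spec_generate_non_fixed_rows_numbers (A : List (List Int)) (n : Int) (out : List (List Int)) : Prop := out = generate_non_fixed_rows_numbers_alt A n
instance (A : List (List Int)) (n : Int) (out : List (List Int)) : Decidable (Spec_generate_non_fixed_rows_numbers A n out) := by unfold Spec_generate_non_fixed_rows_numbers; infer_instance

-- ===== CLAIM (what is proved, stated in full; the proofs are below) =====
def Claim_equal_generate_non_fixed_rows_numbers : Prop := ∀ (A : List (List Int)) (n : Int), Dom_generate_non_fixed_rows_numbers A n → Pre_generate_non_fixed_rows_numbers A n → Spec_generate_non_fixed_rows_numbers A n (generate_non_fixed_rows_numbers A n)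

-- ===== LEMMAS AND PROOFS =====

-- the ordered list of digits 1..9 missing from 'present' — what A's inner scans step through
def pvMissingOf (p : List Int) : List Int :=
  (PySem.List.pyRange 1 10 1).filter (fun d => !(p.contains d))

theorem pvDecide_eq_beq (d m : Int) : (decide (d = m)) = (d == m) := by
  cases h : d == m
  · simp_all
  · simp_all

theorem pvContains_append_singleton (p : List Int) (m d : Int) :
    ((p ++ [m]).contains d) = (p.contains d || (d == m)) := by
  simp [List.mem_append, pvDecide_eq_beq]

theorem pvFindNum_eq_head (nums p : List Int) :
    pvFindNum nums p = (nums.filter (fun d => !(p.contains d))).head? := by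
  induction nums with
  | nil => rfl
  | cons num rest ih =>
    by_cases h : num ∈ p
    · rw [pvFindNum, if_pos (by simpa using h), ih, List.filter_cons]
      simp [h]
    · rw [pvFindNum, if_neg (by simpa using h), List.filter_cons]
      simp [h]

theorem pvMissingOf_append {p : List Int} {m : Int} {ms : List Int}
    (h : pvMissingOf p = m :: ms) : pvMissingOf (p ++ [m]) = ms := by
  have hnd : (pvMissingOf p).Nodup := (PySem.List.nodup_pyRange_one 1 10).filter _
  rw [h] at hnd
  have hm : m ∉ ms := (List.nodup_cons.mp hnd).1
  have step : pvMissingOf (p ++ [m]) = (pvMissingOf p).filter (fun d => !(d == m)) := by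
    simp only [pvMissingOf, List.filter_filter]
    apply List.filter_congr
    intro d _
    rw [pvContains_append_singleton]
    cases hd : d == m <;> cases hp : p.contains d <;> simp_all
  rw [step, h, List.filter_cons]
  simp only [BEq.rfl, Bool.not_true, Bool.false_eq_true, if_false]
  refine List.filter_eq_self.mpr (fun d hd => ?_)
  simp only [Bool.not_eq_true', beq_eq_false_iff_ne, ne_eq]
  intro e
  rw [e] at hd
  exact hm hd

theorem pvFillRow_nil (n : Int) (fuel : Nat) :
    ∀ (j : Int) (r : List Int), (n - j).toNat ≤ fuel → pvFillRow r j n [] = r := by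
  induction fuel with
  | zero =>
    intro j r hf
    rw [pvFillRow.eq_def]
    simp [(show ¬ j < n by omega)]
  | succ fuel ih =>
    intro j r hf
    by_cases hjn : j < n
    · rw [pvFillRow.eq_def]
      simp only [hjn, dif_pos]
      split
      · rfl
      · exact ih (j + 1) r (by omega)
    · rw [pvFillRow.eq_def]
      simp [hjn]

theorem pvLoopA_eq (n : Int) (fuel : Nat) :
    ∀ (j : Int) (r p : List Int), (n - j).toNat ≤ fuel →
    ((PySem.List.pyRange j n 1).foldl pvStepFill (r, p)).1 = pvFillRow r j n (pvMissingOf p) := by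
  induction fuel with
  | zero =>
    intro j r p hf
    rw [PySem.List.pyRange_one_eq_nil (by omega), pvFillRow.eq_def]
    simp [(show ¬ j < n by omega)]
  | succ fuel ih =>
    intro j r p hf
    by_cases hjn : j < n
    · rw [PySem.List.pyRange_one_cons hjn, List.foldl_cons]
      by_cases hg : PySem.List.pyGetD r j 0 > 0
      · rw [show pvStepFill (r, p) j = (r, p) by simp [pvStepFill, hg]]
        rw [ih (j + 1) r p (by omega)]
        conv_rhs => rw [pvFillRow.eq_def]
        simp [hjn, (show ¬ PySem.List.pyGetD r j 0 ≤ 0 by omega)]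
      · have hle : PySem.List.pyGetD r j 0 ≤ 0 := by omega
        have hfind : pvFindNum (PySem.List.pyRange 1 10 1) p = (pvMissingOf p).head? := by
          rw [pvFindNum_eq_head]; rfl
        rcases hm : pvMissingOf p with _ | ⟨m, ms⟩
        · rw [show pvStepFill (r, p) j = (r, p) by
            simp [pvStepFill, hg, hfind, hm]]
          rw [ih (j + 1) r p (by omega), hm,
            pvFillRow_nil n (n - (j + 1)).toNat (j + 1) r (le_refl _)]
          conv_rhs => rw [pvFillRow.eq_def]
          simp [hjn, hle]
        · rw [show pvStepFill (r, p) j = (PySem.List.pySetD r j m, p ++ [m]) by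
            simp [pvStepFill, hg, hfind, hm]]
          rw [ih (j + 1) _ _ (by omega), pvMissingOf_append hm]
          conv_rhs => rw [pvFillRow.eq_def]
          simp [hjn, hle]
    · rw [PySem.List.pyRange_one_eq_nil (by omega), pvFillRow.eq_def]
      simp [hjn]

theorem pvPresent_contains (r : List Int) (n : Int) (hn : 0 ≤ n) (d : Int) (hd : 0 < d) :
    ((PySem.List.pyRange 0 n 1).foldl (pvStepPresent r) []).contains d
      = (PySem.List.slice r none (some n)).contains d := by
  have hs := PySem.List.slice_to (xs := r) hn
  rw [hs]
  have hstep : pvStepPresent r = fun p_ j =>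
      if (decide (PySem.List.pyGetD r j 0 > 0)) = true then p_ ++ [PySem.List.pyGetD r j 0] else p_ := by
    funext p_ j; by_cases h : PySem.List.pyGetD r j 0 > 0 <;> simp [pvStepPresent, h]
  rw [hstep, PySem.List.foldl_append_if]
  simp only [List.nil_append, List.contains_eq_mem, decide_eq_decide,
    List.mem_map, List.mem_filter, PySem.List.mem_pyRange_one, List.mem_take_iff_getElem,
    decide_eq_true_eq]
  constructor
  · rintro ⟨j, ⟨⟨h0, hjn⟩, hpos⟩, heq⟩
    by_cases hlen : j < (r.length : Int)
    · have := PySem.List.pyGetD_eq_getElem (xs := r) (d := 0) h0 hlen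
      refine ⟨j.toNat, by omega, ?_⟩
      rw [← heq, this]
    · have hnone : PySem.List.pyGet? r j = none := by
        rw [PySem.List.pyGet?_eq_none_iff]
        unfold PySem.Raise.InRange
        omega
      have h0' : PySem.List.pyGetD r j 0 = 0 := by simp [PySem.List.pyGetD, hnone]
      omega
  · rintro ⟨k, hk, heq⟩
    refine ⟨(k : Int), ⟨⟨by omega, by omega⟩, ?_⟩, ?_⟩ <;>
      simp only [PySem.List.pyGetD_natCast] <;>
      rw [List.getD_eq_getElem r 0 (by omega)] <;> omega

theorem pvMissing_eq (r : List Int) (n : Int) (hn : 0 ≤ n) :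
    pvMissingOf ((PySem.List.pyRange 0 n 1).foldl (pvStepPresent r) []) = pvMissingB r n := by
  unfold pvMissingOf pvMissingB
  apply List.filter_congr
  intro d hdmem
  have hd : 0 < d := by
    have := (PySem.List.mem_pyRange_one).mp hdmem
    omega
  rw [pvPresent_contains r n hn d hd]

-- ===== VERDICT (by name: the statement is the Claim_ definition above) =====
theorem generate_non_fixed_rows_numbers_spec : Claim_equal_generate_non_fixed_rows_numbers := by
  intro A n _hDom _hPre
  unfold Spec_generate_non_fixed_rows_numbers
  unfold generate_non_fixed_rows_numbers generate_non_fixed_rows_numbers_alt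
  apply PySem.List.foldl_congr_mem
  intro M i hi
  have hn : 0 < n := by
    have := (PySem.List.mem_pyRange_one).mp hi
    omega
  simp only
  congr 1
  rw [pvLoopA_eq n (n - 0).toNat 0 _ _ (le_refl _), pvMissing_eq _ n (by omega)]
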